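-- pv_equiv track=rewrite | github.com/mikaelvincent/intrinsic-rl | code/irl/visualization/timing/taper.py | _method_order
-- ===== SOURCE A (Python) =====
-- def _method_order(methods: list[str]) -> list[str]:
--     order = [
--         "vanilla",
--         "icm",
--         "rnd",
--         "ride",
--         "riac",
--         "glpe_lp_only",
--         "glpe_impact_only",
--         "glpe_nogate",
--         "glpe_cache",
--         "glpe",
--     ]
--     idx = {m: i for i, m in enumerate(order)}
--
--     def key(m: str) -> tuple[int, str]:
--         ml = str(m).strip().lower()
--         if ml in idx:
--             return idx[ml], ml
--         if ml.startswith("glpe_"):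
--             return 90, ml
--         return 100, ml
--
--     return sorted(list(methods), key=key)
-- ===== SOURCE B (Python) =====
-- def _method_order(methods: list[str]) -> list[str]:
--     order = [
--         "vanilla",
--         "icm",
--         "rnd",
--         "ride",
--         "riac",
--         "glpe_lp_only",
--         "glpe_impact_only",
--         "glpe_nogate",
--         "glpe_cache",
--         "glpe",
--     ]
--     norm = [str(m).strip().lower() for m in methods]
--     known = set(order)
--     pairs = list(zip(methods, norm))
--     out = []
--     for entry in order:
--         for m, ml in pairs:
--             if ml == entry:
--                 out.append(m)
--     glpe_unknown = [(ml, m) for m, ml in pairs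
--                     if ml not in known and ml.startswith("glpe_")]
--     other_unknown = [(ml, m) for m, ml in pairs
--                      if ml not in known and not ml.startswith("glpe_")]
--     glpe_unknown.sort(key=lambda p: p[0])
--     other_unknown.sort(key=lambda p: p[0])
--     out.extend(m for _, m in glpe_unknown)
--     out.extend(m for _, m in other_unknown)
--     return out
-- ===== Notes on version B (the rewrite author's own statement) =====
-- stated objective: alternative
-- what changed: Replaces the single comparison sort under a (rank, normalized-name) key by a one-pass bucketed assembly: known names are emitted by walking the fixed priority list in input order, and only the two unknown buckets (glpe_-prefixed and other) are sorted, by normalized name.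
import Mathlib
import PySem

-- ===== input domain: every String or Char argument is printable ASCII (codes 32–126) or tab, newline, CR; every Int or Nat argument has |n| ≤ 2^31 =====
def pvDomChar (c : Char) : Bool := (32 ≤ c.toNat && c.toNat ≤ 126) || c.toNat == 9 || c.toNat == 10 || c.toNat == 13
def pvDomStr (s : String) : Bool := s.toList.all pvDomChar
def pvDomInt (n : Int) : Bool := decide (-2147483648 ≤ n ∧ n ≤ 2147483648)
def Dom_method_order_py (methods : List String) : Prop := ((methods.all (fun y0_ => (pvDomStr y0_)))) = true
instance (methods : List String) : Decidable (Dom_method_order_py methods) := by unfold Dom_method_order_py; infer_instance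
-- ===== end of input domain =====

-- B replaces the single comparison sort by a bucketed assembly: walk the fixed priority
-- list emitting matching inputs in order, then sort only the two unknown buckets (alternative
-- decomposition; no speed claim).

-- ===== PORT A =====
-- order = [...]
def pvOrderA : List String :=
  ["vanilla", "icm", "rnd", "ride", "riac",
   "glpe_lp_only", "glpe_impact_only", "glpe_nogate", "glpe_cache", "glpe"]

-- idx = {m: i for i, m in enumerate(order)}
def pvIdxA : PySem.Dict String Int :=
  (PySem.List.enumerate pvOrderA).foldl (fun d p => d.insert p.2 p.1) PySem.Dict.empty

-- def key(m): ml = str(m).strip().lower(); if ml in idx: return idx[ml], ml; if ml.startswith("glpe_"): return 90, ml; return 100, ml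
-- (the guarded idx[ml] is ported as a match on get?; the none branch is Python's fall-through)
def pvKeyA (m : String) : Int × String :=
  let ml := PySem.Str.lower (PySem.Str.strip m)
  match pvIdxA.get? ml with
  | some i => (i, ml)
  | none => if PySem.Str.startswith ml "glpe_" then (90, ml) else (100, ml)

-- return sorted(list(methods), key=key)  — tuple key, hence sorted2
def method_order_py (methods : List String) : List String :=
  PySem.List.sorted2 methods (fun m => (pvKeyA m).1) (fun m => (pvKeyA m).2) false

-- ===== PORT B =====
def pvOrderB : List String :=
  ["vanilla", "icm", "rnd", "ride", "riac",
   "glpe_lp_only", "glpe_impact_only", "glpe_nogate", "glpe_cache", "glpe"]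

-- ml = str(m).strip().lower()
def pvNorm (m : String) : String := PySem.Str.lower (PySem.Str.strip m)

-- pairs = list(zip(methods, norm))
def pvPairsB (methods : List String) : List (String × String) :=
  methods.zip (methods.map pvNorm)

-- for entry in order: for m, ml in pairs: if ml == entry: out.append(m)
def pvOutB (pairs : List (String × String)) : List String :=
  pvOrderB.foldl
    (fun acc entry => pairs.foldl (fun acc2 p => if p.2 == entry then acc2 ++ [p.1] else acc2) acc)
    []

-- glpe_unknown = [(ml, m) for m, ml in pairs if ml not in known and ml.startswith("glpe_")]
def pvGUnkB (pairs : List (String × String)) : List (String × String) :=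
  (pairs.filter (fun p =>
      !(PySem.Set.contains (PySem.Set.ofList pvOrderB) p.2) && PySem.Str.startswith p.2 "glpe_")).map
    (fun p => (p.2, p.1))

-- other_unknown = [(ml, m) for m, ml in pairs if ml not in known and not ml.startswith("glpe_")]
def pvOUnkB (pairs : List (String × String)) : List (String × String) :=
  (pairs.filter (fun p =>
      !(PySem.Set.contains (PySem.Set.ofList pvOrderB) p.2) && !(PySem.Str.startswith p.2 "glpe_"))).map
    (fun p => (p.2, p.1))

-- .sort(key=lambda p: p[0]) on each bucket, then out.extend of the second components
def method_order_py_alt (methods : List String) : List String :=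
  pvOutB (pvPairsB methods)
    ++ (PySem.List.sorted (pvGUnkB (pvPairsB methods)) (fun p => p.1) false).map (fun p => p.2)
    ++ (PySem.List.sorted (pvOUnkB (pvPairsB methods)) (fun p => p.1) false).map (fun p => p.2)

-- ===== PRECONDITION & SPEC =====
def Spec_method_order_py (methods : List String) (out : List String) : Prop := out = method_order_py_alt methods
instance (methods : List String) (out : List String) : Decidable (Spec_method_order_py methods out) := by unfold Spec_method_order_py; infer_instance

-- ===== CLAIM (what is proved, stated in full; the proofs are below) =====
def Claim_equal_method_order_py : Prop := ∀ (methods : List String), Dom_method_order_py methods → Spec_method_order_py methods (method_order_py methods)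

-- ===== LEMMAS AND PROOFS =====

-- A's comparison, and the same comparison expressed on normalized strings only
def pvBefore (a b : String) : Bool :=
  decide ((pvKeyA a).1 < (pvKeyA b).1)
    || (!decide ((pvKeyA b).1 < (pvKeyA a).1) && decide ((pvKeyA a).2 < (pvKeyA b).2))

def pvRank (ml : String) : Int :=
  match pvIdxA.get? ml with
  | some i => i
  | none => if PySem.Str.startswith ml "glpe_" then 90 else 100

def pvBeforeE (e e' : String) : Bool :=
  decide (pvRank e < pvRank e') || (!decide (pvRank e' < pvRank e) && decide (e < e'))

-- the bucket decomposition B assembles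
def pvBucket (e : String) (ys : List String) : List String :=
  ys.filter (fun m => pvNorm m == e)
def pvGCond (m : String) : Bool :=
  !(decide (pvNorm m ∈ pvOrderA)) && PySem.Str.startswith (pvNorm m) "glpe_"
def pvOCond (m : String) : Bool :=
  !(decide (pvNorm m ∈ pvOrderA)) && !(PySem.Str.startswith (pvNorm m) "glpe_")
def pvGP (ys : List String) : List (String × String) :=
  (ys.filter pvGCond).map (fun m => (pvNorm m, m))
def pvOP (ys : List String) : List (String × String) :=
  (ys.filter pvOCond).map (fun m => (pvNorm m, m))
def pvAsm (ys : List String) : List String :=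
  pvOrderA.flatMap (fun e => pvBucket e ys)
    ++ (PySem.List.sorted (pvGP ys) (fun p => p.1) false).map (fun p => p.2)
    ++ (PySem.List.sorted (pvOP ys) (fun p => p.1) false).map (fun p => p.2)

theorem pv_key_eq (m : String) : pvKeyA m = (pvRank (pvNorm m), pvNorm m) := by
  unfold pvKeyA pvRank pvNorm
  cases h : pvIdxA.get? (PySem.Str.lower (PySem.Str.strip m)) with
  | some i => simp [h]
  | none => simp [h]; split_ifs <;> rfl

theorem pv_before_eq (a b : String) : pvBefore a b = pvBeforeE (pvNorm a) (pvNorm b) := by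
  simp [pvBefore, pvBeforeE, pv_key_eq]

theorem pv_idx_literal : pvIdxA = PySem.Dict.mk
    [("vanilla", 0), ("icm", 1), ("rnd", 2), ("ride", 3), ("riac", 4),
     ("glpe_lp_only", 5), ("glpe_impact_only", 6), ("glpe_nogate", 7), ("glpe_cache", 8), ("glpe", 9)] := by
  decide

theorem pv_idx_none (ml : String) (h : ml ∉ pvOrderA) : pvIdxA.get? ml = none := by
  simp only [pvOrderA, List.mem_cons, List.not_mem_nil, or_false, not_or] at h
  obtain ⟨h1, h2, h3, h4, h5, h6, h7, h8, h9, h10⟩ := h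
  rw [pv_idx_literal]
  simp [PySem.Dict.get?_mk_cons, beq_iff_eq,
    Ne.symm h1, Ne.symm h2, Ne.symm h3, Ne.symm h4, Ne.symm h5,
    Ne.symm h6, Ne.symm h7, Ne.symm h8, Ne.symm h9, Ne.symm h10]
  rfl

theorem pv_rank_g (m : String) (h : pvGCond m = true) : pvRank (pvNorm m) = 90 := by
  simp only [pvGCond, Bool.and_eq_true, Bool.not_eq_true', decide_eq_false_iff_not] at h
  unfold pvRank
  rw [pv_idx_none _ h.1]
  show (if PySem.Str.startswith (pvNorm m) "glpe_" = true then (90 : Int) else 100) = 90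
  rw [h.2]
  simp

theorem pv_rank_o (m : String) (h : pvOCond m = true) : pvRank (pvNorm m) = 100 := by
  simp only [pvOCond, Bool.and_eq_true, Bool.not_eq_true'] at h
  unfold pvRank
  rw [pv_idx_none _ (by simpa using h.1)]
  show (if PySem.Str.startswith (pvNorm m) "glpe_" = true then (90 : Int) else 100) = 100
  rw [h.2]
  simp

theorem pv_rank_known (e : String) (h : e ∈ pvOrderA) : 0 ≤ pvRank e ∧ pvRank e ≤ 9 := by
  simp only [pvOrderA, List.mem_cons, List.not_mem_nil, or_false] at h
  rcases h with rfl | rfl | rfl | rfl | rfl | rfl | rfl | rfl | rfl | rfl <;> decide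

theorem pv_beforeE_of_lt {e e' : String} (h : pvRank e < pvRank e') : pvBeforeE e e' = true := by
  simp only [pvBeforeE, Bool.or_eq_true, decide_eq_true_eq]
  exact Or.inl h

theorem pv_beforeE_of_gt {e e' : String} (h : pvRank e' < pvRank e) : pvBeforeE e e' = false := by
  simp only [pvBeforeE, Bool.or_eq_false_iff, Bool.and_eq_false_iff,
    decide_eq_false_iff_not, Bool.not_eq_false', decide_eq_true_eq, not_lt]
  exact ⟨le_of_lt h, Or.inl h⟩

theorem pv_beforeE_of_eq {e e' : String} (h : pvRank e = pvRank e') :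
    pvBeforeE e e' = decide (e < e') := by
  simp [pvBeforeE, h]

theorem pv_beforeE_self (e : String) : pvBeforeE e e = false := by
  simp [pvBeforeE]

-- insertBy unfolding and placement lemmas
theorem pv_insertBy_nil {α : Type} (bf : α → α → Bool) (x : α) :
    PySem.List.insertBy bf x [] = [x] := rfl

theorem pv_insertBy_cons {α : Type} (bf : α → α → Bool) (x a : α) (l : List α) :
    PySem.List.insertBy bf x (a :: l) = if bf x a then x :: a :: l else a :: PySem.List.insertBy bf x l := rfl

theorem pv_insertBy_append_right {α : Type} (bf : α → α → Bool) (x : α) (l1 l2 : List α)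
    (h : ∀ y ∈ l1, bf x y = false) :
    PySem.List.insertBy bf x (l1 ++ l2) = l1 ++ PySem.List.insertBy bf x l2 := by
  induction l1 with
  | nil => rfl
  | cons a t ih =>
    have ha : bf x a = false := h a (by simp)
    simp only [List.cons_append, pv_insertBy_cons, ha, Bool.false_eq_true, if_false]
    rw [ih (fun y hy => h y (by simp [hy]))]

theorem pv_insertBy_append_left {α : Type} (bf : α → α → Bool) (x : α) (l1 l2 : List α)
    (h : ∀ y ∈ l2, bf x y = true) :
    PySem.List.insertBy bf x (l1 ++ l2) = PySem.List.insertBy bf x l1 ++ l2 := by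
  induction l1 with
  | nil =>
    cases l2 with
    | nil => rfl
    | cons b t =>
      simp only [List.nil_append, pv_insertBy_cons, h b (by simp), if_true, pv_insertBy_nil]
      rfl
  | cons a t ih =>
    simp only [List.cons_append, pv_insertBy_cons]
    by_cases ha : bf x a = true
    · simp [ha]
    · simp only [ha, Bool.false_eq_true, if_false]
      rw [ih]
      simp

theorem pv_insertBy_map {α β : Type} (bf : β → β → Bool) (bg : α → α → Bool)
    (f : α → β) (x : β) (px : α) (ps : List α)
    (hf : ∀ p ∈ ps, bf x (f p) = bg px p) (hx : f px = x) :
    PySem.List.insertBy bf x (ps.map f) = (PySem.List.insertBy bg px ps).map f := by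
  induction ps with
  | nil => simp [pv_insertBy_nil, hx]
  | cons a t ih =>
    simp only [List.map_cons, pv_insertBy_cons, hf a (by simp)]
    by_cases hb : bg px a = true
    · simp [hb, hx]
    · simp only [hb, Bool.false_eq_true, if_false, List.map_cons]
      rw [ih (fun p hp => hf p (by simp [hp]))]

theorem pv_sorted_fst_append (l : List (String × String)) (p : String × String) :
    PySem.List.sorted (l ++ [p]) (fun q => q.1) false
      = PySem.List.insertBy (fun a b => decide (a.1 < b.1)) p (PySem.List.sorted l (fun q => q.1) false) := by
  rw [PySem.List.sorted_eq_foldl_insertBy, PySem.List.sorted_eq_foldl_insertBy, List.foldl_append]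
  rfl

theorem pv_flatMap_congr {α β : Type} (l : List α) (f g : α → List β)
    (h : ∀ a ∈ l, f a = g a) : l.flatMap f = l.flatMap g := by
  induction l with
  | nil => rfl
  | cons a t ih =>
    simp only [List.flatMap_cons, h a (by simp)]
    rw [ih (fun b hb => h b (by simp [hb]))]

-- membership facts
theorem pv_norm_of_mem_bucket {y e : String} {ys : List String}
    (h : y ∈ pvBucket e ys) : pvNorm y = e := by
  simp only [pvBucket, List.mem_filter, beq_iff_eq] at h
  exact h.2

theorem pv_gcond_of_mem_gmap {y : String} {ys : List String}
    (h : y ∈ (PySem.List.sorted (pvGP ys) (fun p => p.1) false).map (fun p => p.2)) :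
    pvGCond y = true := by
  simp only [List.mem_map] at h
  obtain ⟨p, hp, hpy⟩ := h
  rw [PySem.List.mem_sorted] at hp
  simp only [pvGP, List.mem_map, List.mem_filter] at hp
  obtain ⟨m, ⟨_, hc⟩, hpm⟩ := hp
  subst hpm
  simpa [← hpy] using hc

theorem pv_ocond_of_mem_omap {y : String} {ys : List String}
    (h : y ∈ (PySem.List.sorted (pvOP ys) (fun p => p.1) false).map (fun p => p.2)) :
    pvOCond y = true := by
  simp only [List.mem_map] at h
  obtain ⟨p, hp, hpy⟩ := h
  rw [PySem.List.mem_sorted] at hp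
  simp only [pvOP, List.mem_map, List.mem_filter] at hp
  obtain ⟨m, ⟨_, hc⟩, hpm⟩ := hp
  subst hpm
  simpa [← hpy] using hc

theorem pv_bucket_append (e' x : String) (ys : List String) :
    pvBucket e' (ys ++ [x]) = pvBucket e' ys ++ (if pvNorm x == e' then [x] else []) := by
  unfold pvBucket
  rw [List.filter_append,
    show List.filter (fun m => pvNorm m == e') [x] = (if pvNorm x == e' then [x] else []) from by
      rw [List.filter_cons, List.filter_nil]]

-- the heart: inserting the next element into the assembled buckets
theorem pv_step_known (ys : List String) (x e : String) (L1 L2 : List String)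
    (he : pvNorm x = e)
    (hsplit : pvOrderA = L1 ++ e :: L2)
    (h1 : ∀ e' ∈ L1, pvRank e' < pvRank e)
    (h2 : ∀ e' ∈ L2, pvRank e < pvRank e')
    (hne1 : ∀ e' ∈ L1, ¬(e = e'))
    (hne2 : ∀ e' ∈ L2, ¬(e = e'))
    (hR : pvRank e < 90) :
    PySem.List.insertBy pvBefore x (pvAsm ys) = pvAsm (ys ++ [x]) := by
  have hmemE : e ∈ pvOrderA := by rw [hsplit]; simp
  have hmemx : pvNorm x ∈ pvOrderA := by rw [he]; exact hmemE
  have hGx : pvGCond x = false := by simp [pvGCond, hmemx]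
  have hOx : pvOCond x = false := by simp [pvOCond, hmemx]
  have hGP : pvGP (ys ++ [x]) = pvGP ys := by
    simp [pvGP, List.filter_append, List.filter_cons, hGx]
  have hOP : pvOP (ys ++ [x]) = pvOP ys := by
    simp [pvOP, List.filter_append, List.filter_cons, hOx]
  have hfalse1 : ∀ y ∈ L1.flatMap (fun e' => pvBucket e' ys), pvBefore x y = false := by
    intro y hy
    rw [List.mem_flatMap] at hy
    obtain ⟨e', he', hby⟩ := hy
    rw [pv_before_eq, he, pv_norm_of_mem_bucket hby]
    exact pv_beforeE_of_gt (h1 e' he')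
  have htrue2 : ∀ y ∈ L2.flatMap (fun e' => pvBucket e' ys), pvBefore x y = true := by
    intro y hy
    rw [List.mem_flatMap] at hy
    obtain ⟨e', he', hby⟩ := hy
    rw [pv_before_eq, he, pv_norm_of_mem_bucket hby]
    exact pv_beforeE_of_lt (h2 e' he')
  have htrueG : ∀ y ∈ (PySem.List.sorted (pvGP ys) (fun p => p.1) false).map (fun p => p.2),
      pvBefore x y = true := by
    intro y hy
    rw [pv_before_eq, he]
    exact pv_beforeE_of_lt (by rw [pv_rank_g y (pv_gcond_of_mem_gmap hy)]; exact hR)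
  have htrueO : ∀ y ∈ (PySem.List.sorted (pvOP ys) (fun p => p.1) false).map (fun p => p.2),
      pvBefore x y = true := by
    intro y hy
    rw [pv_before_eq, he]
    exact pv_beforeE_of_lt
      (by rw [pv_rank_o y (pv_ocond_of_mem_omap hy)]; exact lt_trans hR (by norm_num))
  have hfe : ∀ y ∈ pvBucket e ys, pvBefore x y = false := by
    intro y hy
    rw [pv_before_eq, he, pv_norm_of_mem_bucket hy]
    exact pv_beforeE_self e
  have hL1 : L1.flatMap (fun e' => pvBucket e' (ys ++ [x])) = L1.flatMap (fun e' => pvBucket e' ys) := by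
    refine pv_flatMap_congr _ _ _ (fun e' he' => ?_)
    rw [pv_bucket_append, he]
    simp [beq_iff_eq, hne1 e' he']
  have hL2 : L2.flatMap (fun e' => pvBucket e' (ys ++ [x])) = L2.flatMap (fun e' => pvBucket e' ys) := by
    refine pv_flatMap_congr _ _ _ (fun e' he' => ?_)
    rw [pv_bucket_append, he]
    simp [beq_iff_eq, hne2 e' he']
  have hBe : pvBucket e (ys ++ [x]) = pvBucket e ys ++ [x] := by
    rw [pv_bucket_append, he]
    simp
  rw [pvAsm, pvAsm, hGP, hOP, hsplit]
  rw [pv_insertBy_append_left _ _ _ _ htrueO]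
  rw [pv_insertBy_append_left _ _ _ _ htrueG]
  rw [List.flatMap_append, List.flatMap_cons]
  rw [pv_insertBy_append_right _ _ _ _ hfalse1]
  rw [pv_insertBy_append_left _ _ _ _ htrue2]
  rw [PySem.List.insertBy_of_forall_not_before _ _ _ hfe]
  rw [List.flatMap_append, List.flatMap_cons]
  rw [hL1, hL2, hBe]

theorem pv_step_g (ys : List String) (x : String) (hg : pvGCond x = true) :
    PySem.List.insertBy pvBefore x (pvAsm ys) = pvAsm (ys ++ [x]) := by
  have hrx : pvRank (pvNorm x) = 90 := pv_rank_g x hg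
  have hg' := hg
  simp only [pvGCond, Bool.and_eq_true, Bool.not_eq_true', decide_eq_false_iff_not] at hg'
  have hOx : pvOCond x = false := by
    unfold pvOCond
    rw [hg'.2]
    simp
  have hfalse : ∀ y ∈ pvOrderA.flatMap (fun e' => pvBucket e' ys), pvBefore x y = false := by
    intro y hy
    rw [List.mem_flatMap] at hy
    obtain ⟨e', he', hby⟩ := hy
    rw [pv_before_eq, pv_norm_of_mem_bucket hby]
    refine pv_beforeE_of_gt ?_
    rw [hrx]
    have := (pv_rank_known e' he').2
    omega
  have htrueO : ∀ y ∈ (PySem.List.sorted (pvOP ys) (fun p => p.1) false).map (fun p => p.2),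
      pvBefore x y = true := by
    intro y hy
    rw [pv_before_eq]
    refine pv_beforeE_of_lt ?_
    rw [hrx, pv_rank_o y (pv_ocond_of_mem_omap hy)]
    norm_num
  have hmap : PySem.List.insertBy pvBefore x
        ((PySem.List.sorted (pvGP ys) (fun p => p.1) false).map (fun p => p.2))
      = (PySem.List.insertBy (fun a b => decide (a.1 < b.1)) (pvNorm x, x)
          (PySem.List.sorted (pvGP ys) (fun p => p.1) false)).map (fun p => p.2) := by
    refine pv_insertBy_map _ _ _ _ _ _ (fun p hp => ?_) rfl
    rw [PySem.List.mem_sorted] at hp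
    simp only [pvGP, List.mem_map, List.mem_filter] at hp
    obtain ⟨m, ⟨_, hcm⟩, hpm⟩ := hp
    subst hpm
    rw [pv_before_eq, pv_beforeE_of_eq (by rw [hrx, pv_rank_g m hcm])]
  have hGP : pvGP (ys ++ [x]) = pvGP ys ++ [(pvNorm x, x)] := by
    simp [pvGP, List.filter_append, List.filter_cons, hg]
  have hOP : pvOP (ys ++ [x]) = pvOP ys := by
    simp [pvOP, List.filter_append, List.filter_cons, hOx]
  have hBk : ∀ e' ∈ pvOrderA, pvBucket e' (ys ++ [x]) = pvBucket e' ys := by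
    intro e' he'
    rw [pv_bucket_append]
    have hne : ¬(pvNorm x = e') := fun hc => hg'.1 (hc ▸ he')
    simp [beq_iff_eq, hne]
  rw [pvAsm, pvAsm, hGP, hOP, pv_flatMap_congr _ _ _ hBk, pv_sorted_fst_append]
  rw [pv_insertBy_append_left _ _ _ _ htrueO]
  rw [pv_insertBy_append_right _ _ _ _ hfalse]
  rw [hmap]

theorem pv_step_o (ys : List String) (x : String) (ho : pvOCond x = true) :
    PySem.List.insertBy pvBefore x (pvAsm ys) = pvAsm (ys ++ [x]) := by
  have hrx : pvRank (pvNorm x) = 100 := pv_rank_o x ho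
  have ho' := ho
  simp only [pvOCond, Bool.and_eq_true, Bool.not_eq_true', decide_eq_false_iff_not] at ho'
  have hGx : pvGCond x = false := by
    unfold pvGCond
    rw [ho'.2]
    simp
  have hfalse : ∀ y ∈ pvOrderA.flatMap (fun e' => pvBucket e' ys)
      ++ (PySem.List.sorted (pvGP ys) (fun p => p.1) false).map (fun p => p.2),
      pvBefore x y = false := by
    intro y hy
    rw [pv_before_eq]
    rcases List.mem_append.mp hy with h | h
    · rw [List.mem_flatMap] at h
      obtain ⟨e', he', hby⟩ := h
      rw [pv_norm_of_mem_bucket hby]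
      refine pv_beforeE_of_gt ?_
      rw [hrx]
      have := (pv_rank_known e' he').2
      omega
    · refine pv_beforeE_of_gt ?_
      rw [hrx, pv_rank_g y (pv_gcond_of_mem_gmap h)]
      norm_num
  have hmap : PySem.List.insertBy pvBefore x
        ((PySem.List.sorted (pvOP ys) (fun p => p.1) false).map (fun p => p.2))
      = (PySem.List.insertBy (fun a b => decide (a.1 < b.1)) (pvNorm x, x)
          (PySem.List.sorted (pvOP ys) (fun p => p.1) false)).map (fun p => p.2) := by
    refine pv_insertBy_map _ _ _ _ _ _ (fun p hp => ?_) rfl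
    rw [PySem.List.mem_sorted] at hp
    simp only [pvOP, List.mem_map, List.mem_filter] at hp
    obtain ⟨m, ⟨_, hcm⟩, hpm⟩ := hp
    subst hpm
    rw [pv_before_eq, pv_beforeE_of_eq (by rw [hrx, pv_rank_o m hcm])]
  have hOP : pvOP (ys ++ [x]) = pvOP ys ++ [(pvNorm x, x)] := by
    simp [pvOP, List.filter_append, List.filter_cons, ho]
  have hGP : pvGP (ys ++ [x]) = pvGP ys := by
    simp [pvGP, List.filter_append, List.filter_cons, hGx]
  have hBk : ∀ e' ∈ pvOrderA, pvBucket e' (ys ++ [x]) = pvBucket e' ys := by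
    intro e' he'
    rw [pv_bucket_append]
    have hne : ¬(pvNorm x = e') := fun hc => ho'.1 (hc ▸ he')
    simp [beq_iff_eq, hne]
  rw [pvAsm, pvAsm, hGP, hOP, pv_flatMap_congr _ _ _ hBk, pv_sorted_fst_append]
  rw [pv_insertBy_append_right _ _ _ _ hfalse]
  rw [hmap]

theorem pv_step (ys : List String) (x : String) :
    PySem.List.insertBy pvBefore x (pvAsm ys) = pvAsm (ys ++ [x]) := by
  by_cases hmem : pvNorm x ∈ pvOrderA
  · have h10 : pvNorm x = "vanilla" ∨ pvNorm x = "icm" ∨ pvNorm x = "rnd" ∨ pvNorm x = "ride" ∨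
        pvNorm x = "riac" ∨ pvNorm x = "glpe_lp_only" ∨ pvNorm x = "glpe_impact_only" ∨
        pvNorm x = "glpe_nogate" ∨ pvNorm x = "glpe_cache" ∨ pvNorm x = "glpe" := by
      simpa [pvOrderA] using hmem
    rcases h10 with he | he | he | he | he | he | he | he | he | he
    · exact pv_step_known ys x _ [] ["icm","rnd","ride","riac","glpe_lp_only","glpe_impact_only","glpe_nogate","glpe_cache","glpe"] he rfl (by decide) (by decide) (by decide) (by decide) (by decide)
    · exact pv_step_known ys x _ ["vanilla"] ["rnd","ride","riac","glpe_lp_only","glpe_impact_only","glpe_nogate","glpe_cache","glpe"] he rfl (by decide) (by decide) (by decide) (by decide) (by decide)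
    · exact pv_step_known ys x _ ["vanilla","icm"] ["ride","riac","glpe_lp_only","glpe_impact_only","glpe_nogate","glpe_cache","glpe"] he rfl (by decide) (by decide) (by decide) (by decide) (by decide)
    · exact pv_step_known ys x _ ["vanilla","icm","rnd"] ["riac","glpe_lp_only","glpe_impact_only","glpe_nogate","glpe_cache","glpe"] he rfl (by decide) (by decide) (by decide) (by decide) (by decide)
    · exact pv_step_known ys x _ ["vanilla","icm","rnd","ride"] ["glpe_lp_only","glpe_impact_only","glpe_nogate","glpe_cache","glpe"] he rfl (by decide) (by decide) (by decide) (by decide) (by decide)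
    · exact pv_step_known ys x _ ["vanilla","icm","rnd","ride","riac"] ["glpe_impact_only","glpe_nogate","glpe_cache","glpe"] he rfl (by decide) (by decide) (by decide) (by decide) (by decide)
    · exact pv_step_known ys x _ ["vanilla","icm","rnd","ride","riac","glpe_lp_only"] ["glpe_nogate","glpe_cache","glpe"] he rfl (by decide) (by decide) (by decide) (by decide) (by decide)
    · exact pv_step_known ys x _ ["vanilla","icm","rnd","ride","riac","glpe_lp_only","glpe_impact_only"] ["glpe_cache","glpe"] he rfl (by decide) (by decide) (by decide) (by decide) (by decide)
    · exact pv_step_known ys x _ ["vanilla","icm","rnd","ride","riac","glpe_lp_only","glpe_impact_only","glpe_nogate"] ["glpe"] he rfl (by decide) (by decide) (by decide) (by decide) (by decide)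
    · exact pv_step_known ys x _ ["vanilla","icm","rnd","ride","riac","glpe_lp_only","glpe_impact_only","glpe_nogate","glpe_cache"] [] he rfl (by decide) (by decide) (by decide) (by decide) (by decide)
  · by_cases hs : PySem.Str.startswith (pvNorm x) "glpe_" = true
    · refine pv_step_g ys x ?_
      unfold pvGCond
      rw [hs]
      simp [hmem]
    · refine pv_step_o ys x ?_
      unfold pvOCond
      rw [Bool.eq_false_iff.mpr hs]
      simp [hmem]

theorem pv_asm_nil : pvAsm [] = [] := by decide

theorem pv_foldl_eq_asm (methods : List String) :
    List.foldl (fun acc x => PySem.List.insertBy pvBefore x acc) [] methods = pvAsm methods := by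
  induction methods using List.reverseRecOn with
  | nil => exact pv_asm_nil.symm
  | append_singleton ys x ih =>
    rw [List.foldl_append]
    simp only [List.foldl_cons, List.foldl_nil]
    rw [ih, pv_step]

theorem pv_A_eq (methods : List String) :
    method_order_py methods
      = List.foldl (fun acc x => PySem.List.insertBy pvBefore x acc) [] methods := rfl

-- B-side rewriting
theorem pv_zip_map_self (methods : List String) :
    methods.zip (methods.map pvNorm) = methods.map (fun m => (m, pvNorm m)) := by
  induction methods with
  | nil => rfl
  | cons a t ih => simp [ih]

theorem pv_orderB_eq : pvOrderB = pvOrderA := rfl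

theorem pv_contains_ofList (l : List String) (y : String) :
    PySem.Set.contains (PySem.Set.ofList l) y = decide (y ∈ l) := by
  by_cases h : y ∈ l
  · simp [h, (PySem.Set.contains_iff _ _).mpr ((PySem.Set.mem_ofList _ _).mpr h)]
  · have hnc : ¬(PySem.Set.contains (PySem.Set.ofList l) y = true) :=
      fun hc => h ((PySem.Set.mem_ofList _ _).mp ((PySem.Set.contains_iff _ _).mp hc))
    simp [h, Bool.eq_false_iff.mpr hnc]

theorem pv_outB_outer (pairs : List (String × String)) (es : List String) (acc : List String) :
    es.foldl (fun acc entry => pairs.foldl (fun acc2 p => if p.2 == entry then acc2 ++ [p.1] else acc2) acc) acc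
      = acc ++ es.flatMap (fun e => (pairs.filter (fun p => p.2 == e)).map (fun p => p.1)) := by
  induction es generalizing acc with
  | nil => simp
  | cons e t ih =>
    rw [List.foldl_cons,
      PySem.List.foldl_append_if (fun (p : String × String) => p.2 == e) (fun (p : String × String) => p.1) pairs acc,
      ih]
    simp [List.flatMap_cons]

theorem pv_outB_eq (methods : List String) :
    pvOutB (pvPairsB methods) = pvOrderA.flatMap (fun e => pvBucket e methods) := by
  rw [pvOutB, pvPairsB, pv_zip_map_self, pv_orderB_eq, pv_outB_outer, List.nil_append]
  refine pv_flatMap_congr _ _ _ (fun e _ => ?_)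
  rw [List.filter_map, List.map_map]
  simp [pvBucket, Function.comp_def]

theorem pv_pairs_swap (methods : List String) (P : String × String → Bool) (c : String → Bool)
    (hc : ∀ m, P (m, pvNorm m) = c m) :
    ((methods.map (fun m => (m, pvNorm m))).filter P).map (fun p => (p.2, p.1))
      = (methods.filter c).map (fun m => (pvNorm m, m)) := by
  induction methods with
  | nil => rfl
  | cons a t ih =>
    simp only [List.map_cons, List.filter_cons, hc a]
    cases h : c a
    · simp [ih]
    · simp [ih]

theorem pv_gunk_eq (methods : List String) : pvGUnkB (pvPairsB methods) = pvGP methods := by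
  rw [pvGUnkB, pvPairsB, pv_zip_map_self, pvGP]
  refine pv_pairs_swap methods _ _ (fun m => ?_)
  show (!(PySem.Set.contains (PySem.Set.ofList pvOrderB) (pvNorm m))
      && PySem.Str.startswith (pvNorm m) "glpe_") = pvGCond m
  rw [pv_contains_ofList, pv_orderB_eq]
  rfl

theorem pv_ounk_eq (methods : List String) : pvOUnkB (pvPairsB methods) = pvOP methods := by
  rw [pvOUnkB, pvPairsB, pv_zip_map_self, pvOP]
  refine pv_pairs_swap methods _ _ (fun m => ?_)
  show (!(PySem.Set.contains (PySem.Set.ofList pvOrderB) (pvNorm m))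
      && !(PySem.Str.startswith (pvNorm m) "glpe_")) = pvOCond m
  rw [pv_contains_ofList, pv_orderB_eq]
  rfl

theorem pv_B_eq (methods : List String) : method_order_py_alt methods = pvAsm methods := by
  rw [method_order_py_alt, pv_outB_eq, pv_gunk_eq, pv_ounk_eq, pvAsm]

-- ===== VERDICT (by name: the statement is the Claim_ definition above) =====
theorem method_order_py_spec : Claim_equal_method_order_py := by
  intro methods _
  unfold Spec_method_order_py
  rw [pv_A_eq, pv_foldl_eq_asm, pv_B_eq]
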